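-- pv_equiv track=rewrite | github.com/lsjsg/coding-note | SUTD_DW/5_week/cohort2.py | display_calendar
-- ===== SOURCE A (Python) =====
-- def leap_year(year):
--     return (year % 4 == 0 and year % 100 != 0) or (year % 400 == 0 and year % 3200 != 0)
--
-- def day_of_week_jan1(year):
--     return ( 1 + 5*((year - 1)%4) + 4*((year - 1)%100) + 6*((year-1)%400) ) % 7
--
-- def num_days_in_month(month_num, leap_year):
--     return [31,29 if leap_year else 28,31,30,31,30,31,31,30,31,30,31][month_num-1]
--
-- def construct_cal_month(month_num, first_day_of_month, num_days_in_month):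
--     result=[["January","February","March","April","May","June","July","August","September","October","November","December"][month_num-1]]
--     day_of_the_month = 1
--     day_of_the_week = first_day_of_month
--     week = "   " * first_day_of_month
--     while day_of_the_month <= num_days_in_month:
--         if day_of_the_week<=6:
--             week += "{:>3}".format(day_of_the_month)
--             day_of_the_month += 1
--             day_of_the_week += 1
--         else:
--             result.append(week)
--             week=""
--             day_of_the_week = 0
--     result.append(week)
--     return result
--
-- def construct_cal_year(year):
--     first,l = day_of_week_jan1(year),[year]
--     for i in range(1,13):
--         l.append(construct_cal_month(i,first,num_days_in_month(i,leap_year(year))))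
--         first = (first + num_days_in_month(i,leap_year(year)))%7
--     return l
--
-- def display_calendar(year):
--     # string = str(year) + '\n'
--     string = ""
--     for i in construct_cal_year(year)[1:]:
--         string += i[0] + "\n" + "  S  M  T  W  T  F  S\n"
--         for j in i[1:]:
--             string += j + '\n'
--         string += '\n'
--     return string[:-2]
-- ===== SOURCE B (Python) =====
-- def display_calendar(year):
--     leap = (year % 4 == 0 and year % 100 != 0) or (year % 400 == 0 and year % 3200 != 0)
--     first = (1 + 5*((year - 1) % 4) + 4*((year - 1) % 100) + 6*((year - 1) % 400)) % 7
--     month_lengths = [31, 29 if leap else 28, 31, 30, 31, 30, 31, 31, 30, 31, 30, 31]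
--     names = ["January", "February", "March", "April", "May", "June",
--              "July", "August", "September", "October", "November", "December"]
--     blocks = []
--     for name, n in zip(names, month_lengths):
--         cells = ["   "] * first + ["{:>3}".format(d) for d in range(1, n + 1)]
--         weeks = ["".join(cells[i:i + 7]) for i in range(0, len(cells), 7)]
--         blocks.append(name + "\n  S  M  T  W  T  F  S\n" + "\n".join(weeks) + "\n\n")
--         first = (first + n) % 7
--     return "".join(blocks)[:-2]
-- ===== Notes on version B (the rewrite author's own statement) =====
-- stated objective: simpler
-- what changed: Replaces the per-month while-loop with its day/weekday counters and mid-loop week resets by building the complete ordered list of fixed-width day cells (leading blanks plus formatted days) and chunking it into week-sized groups, then assembling the blocks declaratively.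
import Mathlib
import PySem

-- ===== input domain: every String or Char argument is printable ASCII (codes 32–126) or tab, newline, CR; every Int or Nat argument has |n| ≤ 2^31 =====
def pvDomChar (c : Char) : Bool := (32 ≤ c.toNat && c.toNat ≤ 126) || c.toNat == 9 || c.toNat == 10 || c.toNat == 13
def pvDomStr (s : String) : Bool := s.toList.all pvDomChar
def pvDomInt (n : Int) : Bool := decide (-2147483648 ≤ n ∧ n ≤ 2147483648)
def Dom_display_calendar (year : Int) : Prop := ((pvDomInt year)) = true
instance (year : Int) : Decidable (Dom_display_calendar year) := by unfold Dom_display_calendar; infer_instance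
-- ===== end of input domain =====

-- B replaces A's day/weekday counter while-loop by building each month's full ordered list of
-- fixed-width day cells and chunking it into week-sized groups (objective: simpler decomposition, same cost).
-- Text is carried as List Char (PySem.Chars style) and wrapped into String at the end.

-- ===== PORT A =====

-- '{:>3}'.format(n): right-justify str(n) in width 3 (shared primitive port of the format call)
def pvFmt3 (n : Int) : List Char :=
  let cs := PySem.Int.toChars n
  List.replicate (3 - cs.length) ' ' ++ cs

def pvLeapYear (year : Int) : Bool :=
  (PySem.Int.mod year 4 == 0 && !(PySem.Int.mod year 100 == 0)) ||
  (PySem.Int.mod year 400 == 0 && !(PySem.Int.mod year 3200 == 0))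

def pvDayOfWeekJan1 (year : Int) : Int :=
  PySem.Int.mod (1 + 5 * PySem.Int.mod (year - 1) 4 + 4 * PySem.Int.mod (year - 1) 100
    + 6 * PySem.Int.mod (year - 1) 400) 7

-- list[month_num-1]; the index is in range at every call site (months 1..12), so getD 0 is never taken
def pvNumDaysInMonth (month_num : Int) (leap : Bool) : Int :=
  (PySem.List.pyGet? [31, if leap then 29 else 28, 31, 30, 31, 30, 31, 31, 30, 31, 30, 31]
    (month_num - 1)).getD 0

def pvMonthNames : List (List Char) :=
  ["January".toList, "February".toList, "March".toList, "April".toList, "May".toList,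
   "June".toList, "July".toList, "August".toList, "September".toList, "October".toList,
   "November".toList, "December".toList]

-- the while-loop of construct_cal_month, state = (day_of_the_month, day_of_the_week, week, result);
-- fuel only makes the recursion structural: each iteration strictly decreases
-- 2*(numDays+1-dom) + (dow ≤ 6 ? 0 : 1), so the fuel chosen below never runs out
def pvCalMonthLoop : Nat → Int → Int → Int → List Char → List (List Char) → List (List Char)
  | 0, _, _, _, week, result => result ++ [week]  -- unreachable with the fuel used below
  | fuel + 1, numDays, dom, dow, week, result =>
    if dom ≤ numDays then
      if dow ≤ 6 then
        pvCalMonthLoop fuel numDays (dom + 1) (dow + 1) (week ++ pvFmt3 dom) result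
      else
        pvCalMonthLoop fuel numDays dom 0 [] (result ++ [week])
    else result ++ [week]

-- "   " * first_day is List.flatten (List.replicate …): Python's str*int is empty for n ≤ 0, as toNat
def pvConstructCalMonth (month_num first_day num_days : Int) : List (List Char) :=
  pvCalMonthLoop (2 * (num_days + 1).toNat + 2) num_days 1 first_day
    (List.flatten (List.replicate first_day.toNat "   ".toList))
    [(PySem.List.pyGet? pvMonthNames (month_num - 1)).getD []]

-- Python builds the heterogeneous list [year, month1, …, month12]; ported as (year, months);
-- display_calendar's [1:] is exactly the second component
def pvConstructCalYear (year : Int) : Int × List (List (List Char)) :=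
  let st := (PySem.List.pyRange 1 13 1).foldl
    (fun (st : Int × List (List (List Char))) i =>
      (PySem.Int.mod (st.1 + pvNumDaysInMonth i (pvLeapYear year)) 7,
       st.2 ++ [pvConstructCalMonth i st.1 (pvNumDaysInMonth i (pvLeapYear year))]))
    (pvDayOfWeekJan1 year, [])
  (year, st.2)

def display_calendar (year : Int) : String :=
  let s := ((pvConstructCalYear year).2).foldl
    (fun (s : List Char) i =>
      ((i.drop 1).foldl (fun s j => s ++ j ++ "\n".toList)
        (s ++ (PySem.List.pyGet? i 0).getD [] ++ "\n".toList ++ "  S  M  T  W  T  F  S\n".toList))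
      ++ "\n".toList)
    []
  String.ofList (PySem.List.slice s none (some (-2)))

-- ===== PORT B =====

-- ["".join(cells[i:i+7]) for i in range(0, len(cells), 7)]: chunk the cell list into weeks of 7;
-- fuel = list length makes the recursion structural and is always enough (drop 7 shortens the list)
def pvChunks7Fuel : Nat → List (List Char) → List (List Char)
  | _, [] => []
  | 0, _ :: _ => []  -- unreachable with fuel ≥ length
  | fuel + 1, c :: cs => List.flatten ((c :: cs).take 7) :: pvChunks7Fuel fuel ((c :: cs).drop 7)

def pvChunks7 (l : List (List Char)) : List (List Char) := pvChunks7Fuel l.length l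

def pvNamesB : List (List Char) :=
  ["January".toList, "February".toList, "March".toList, "April".toList, "May".toList,
   "June".toList, "July".toList, "August".toList, "September".toList, "October".toList,
   "November".toList, "December".toList]

def display_calendar_alt (year : Int) : String :=
  let leap := (PySem.Int.mod year 4 == 0 && !(PySem.Int.mod year 100 == 0)) ||
    (PySem.Int.mod year 400 == 0 && !(PySem.Int.mod year 3200 == 0))
  let first := PySem.Int.mod (1 + 5 * PySem.Int.mod (year - 1) 4 + 4 * PySem.Int.mod (year - 1) 100
    + 6 * PySem.Int.mod (year - 1) 400) 7
  let monthLengths : List Int := [31, if leap then 29 else 28, 31, 30, 31, 30, 31, 31, 30, 31, 30, 31]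
  let st := (pvNamesB.zip monthLengths).foldl
    (fun (st : Int × List (List Char)) p =>
      let cells := List.replicate st.1.toNat "   ".toList ++ (PySem.List.pyRange 1 (p.2 + 1) 1).map pvFmt3
      let weeks := pvChunks7 cells
      (PySem.Int.mod (st.1 + p.2) 7,
       st.2 ++ [p.1 ++ "\n  S  M  T  W  T  F  S\n".toList
                ++ PySem.Chars.join "\n".toList weeks ++ "\n\n".toList]))
    (first, [])
  String.ofList (PySem.List.slice (List.flatten st.2) none (some (-2)))

-- ===== PRECONDITION & SPEC =====
def Spec_display_calendar (year : Int) (out : String) : Prop := out = display_calendar_alt year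
instance (year : Int) (out : String) : Decidable (Spec_display_calendar year out) := by unfold Spec_display_calendar; infer_instance

-- ===== CLAIM (what is proved, stated in full; the proofs are below) =====
def Claim_equal_display_calendar : Prop := ∀ (year : Int), Dom_display_calendar year → Spec_display_calendar year (display_calendar year)

-- ===== LEMMAS AND PROOFS =====

-- both programs depend on the year only through first-weekday (0..6) and the leap flag
def pvABodyChars (first : Int) (leap : Bool) : List Char :=
  let st := (PySem.List.pyRange 1 13 1).foldl
    (fun (st : Int × List (List (List Char))) i =>
      (PySem.Int.mod (st.1 + pvNumDaysInMonth i leap) 7,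
       st.2 ++ [pvConstructCalMonth i st.1 (pvNumDaysInMonth i leap)]))
    (first, [])
  let s := st.2.foldl
    (fun (s : List Char) i =>
      ((i.drop 1).foldl (fun s j => s ++ j ++ "\n".toList)
        (s ++ (PySem.List.pyGet? i 0).getD [] ++ "\n".toList ++ "  S  M  T  W  T  F  S\n".toList))
      ++ "\n".toList)
    []
  PySem.List.slice s none (some (-2))

def pvBBodyChars (first : Int) (leap : Bool) : List Char :=
  let monthLengths : List Int := [31, if leap then 29 else 28, 31, 30, 31, 30, 31, 31, 30, 31, 30, 31]
  let st := (pvNamesB.zip monthLengths).foldl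
    (fun (st : Int × List (List Char)) p =>
      let cells := List.replicate st.1.toNat "   ".toList ++ (PySem.List.pyRange 1 (p.2 + 1) 1).map pvFmt3
      let weeks := pvChunks7 cells
      (PySem.Int.mod (st.1 + p.2) 7,
       st.2 ++ [p.1 ++ "\n  S  M  T  W  T  F  S\n".toList
                ++ PySem.Chars.join "\n".toList weeks ++ "\n\n".toList]))
    (first, [])
  PySem.List.slice (List.flatten st.2) none (some (-2))

theorem pvA_factor (year : Int) :
    display_calendar year = String.ofList (pvABodyChars (pvDayOfWeekJan1 year) (pvLeapYear year)) := rfl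

theorem pvB_factor (year : Int) :
    display_calendar_alt year = String.ofList (pvBBodyChars (pvDayOfWeekJan1 year) (pvLeapYear year)) := rfl

set_option maxRecDepth 40000 in
set_option maxHeartbeats 4000000 in
theorem pvBody_eq (first : Int) (h0 : 0 ≤ first) (h7 : first < 7) (leap : Bool) :
    pvABodyChars first leap = pvBBodyChars first leap := by
  interval_cases first <;> cases leap <;> decide

-- ===== VERDICT (by name: the statement is the Claim_ definition above) =====
theorem display_calendar_spec : Claim_equal_display_calendar := by
  intro year _
  unfold Spec_display_calendar
  rw [pvA_factor, pvB_factor]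
  exact congrArg String.ofList
    (pvBody_eq _ (PySem.Int.mod_nonneg _ (by norm_num)) (PySem.Int.mod_lt _ (by norm_num)) _)
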